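-- pv_equiv track=rewrite | github.com/edcuth/hacker-rank | python/algorithm practice/Migratory Birds.py | migratoryBirds
-- ===== SOURCE A (Python) =====
-- def migratoryBirds(arr):
--     arr.sort()
--     highest = 0
--     count = 0
--     counted = []
--     for i in arr:
--         if i not in counted:
--             counted.append(i)
--             if arr.count(i) > count:
--                 count = arr.count(i)
--                 highest = i
--     return highest
-- ===== SOURCE B (Python) =====
-- def migratoryBirds(arr):
--     arr.sort()
--     best = 0
--     best_len = 0
--     rest = arr
--     while rest:
--         v = rest[0]
--         k = 1
--         while k < len(rest) and rest[k] == v: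
--             k += 1
--         if k > best_len:
--             best = v
--             best_len = k
--         rest = rest[k:]
--     return best
-- ===== Notes on version B (the rewrite author's own statement) =====
-- stated objective: faster
-- what changed: Replaces A's seen-values list with its linear membership test and two full arr.count() rescans per new value by a single linear pass over the sorted array that measures each run of equal elements and keeps the first strictly-longest run.
import Mathlib
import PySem

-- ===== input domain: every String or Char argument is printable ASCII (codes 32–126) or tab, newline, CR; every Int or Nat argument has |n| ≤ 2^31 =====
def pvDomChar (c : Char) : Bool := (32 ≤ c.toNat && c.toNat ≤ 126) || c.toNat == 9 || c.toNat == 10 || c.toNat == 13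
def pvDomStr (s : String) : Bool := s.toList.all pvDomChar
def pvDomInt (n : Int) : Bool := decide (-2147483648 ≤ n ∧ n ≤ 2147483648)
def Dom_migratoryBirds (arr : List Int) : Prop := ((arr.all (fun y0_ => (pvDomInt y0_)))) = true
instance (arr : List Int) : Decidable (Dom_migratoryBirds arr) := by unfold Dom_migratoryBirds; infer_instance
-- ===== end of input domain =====

-- B replaces A's seen-list membership test and repeated arr.count rescans (O(n^2)) by a single
-- linear pass over the sorted array grouping runs of equal elements (objective: faster, constant
-- dominated by the sort). Both A and B sort arr in place (same mutation); equivalence is about the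
-- return value.

-- ===== PORT A =====
-- the for-loop: state (highest, count, counted); arr.count(i) counts in the (sorted) full list s
def loopA (s : List Int) : List Int → Int × Int × List Int → Int × Int × List Int
  | [], st => st
  | i :: rest, (highest, count, counted) =>
    if i ∈ counted then
      loopA s rest (highest, count, counted)
    else
      if (PySem.List.count s i : Int) > count then
        loopA s rest (i, (PySem.List.count s i : Int), counted ++ [i])
      else
        loopA s rest (highest, count, counted ++ [i])

def migratoryBirds (arr : List Int) : Int :=
  let s := PySem.List.sorted arr (fun x => x) false   -- arr.sort()
  (loopA s s (0, 0, [])).1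

-- ===== PORT B =====
-- inner while: length of the prefix of xs equal to v (k counts v itself separately)
def runLen (v : Int) : List Int → Nat
  | [] => 0
  | x :: xs => if x = v then runLen v xs + 1 else 0

-- outer while over rest, state (best, best_len)
def scanRuns : List Int → Int → Int → Int
  | [], best, _ => best
  | v :: xs, best, bestLen =>
    let k : Int := (runLen v xs : Int) + 1
    if k > bestLen then scanRuns (xs.drop (runLen v xs)) v k
    else scanRuns (xs.drop (runLen v xs)) best bestLen
termination_by xs => xs.length
decreasing_by all_goals simp [List.length_drop]

def migratoryBirds_alt (arr : List Int) : Int :=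
  scanRuns (PySem.List.sorted arr (fun x => x) false) 0 0

-- ===== PRECONDITION & SPEC =====
def Spec_migratoryBirds (arr : List Int) (out : Int) : Prop := out = migratoryBirds_alt arr
instance (arr : List Int) (out : Int) : Decidable (Spec_migratoryBirds arr out) := by unfold Spec_migratoryBirds; infer_instance

-- ===== CLAIM (what is proved, stated in full; the proofs are below) =====
def Claim_equal_migratoryBirds : Prop := ∀ (arr : List Int), Dom_migratoryBirds arr → Spec_migratoryBirds arr (migratoryBirds arr)

-- ===== LEMMAS AND PROOFS =====

lemma runLen_le (v : Int) (xs : List Int) : runLen v xs ≤ xs.length := by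
  induction xs with
  | nil => simp [runLen]
  | cons x xs ih => simp only [runLen]; split <;> simp [Nat.succ_le_succ ih]

lemma mem_take_runLen (v : Int) (xs : List Int) :
    ∀ y ∈ xs.take (runLen v xs), y = v := by
  induction xs with
  | nil => simp
  | cons x xs ih =>
    simp only [runLen]
    split
    · next hx =>
      intro y hy
      rw [List.take_succ_cons] at hy
      rcases List.mem_cons.mp hy with rfl | hy'
      · exact hx
      · exact ih y hy'
    · simp

lemma drop_runLen_head_ne (v : Int) (xs : List Int) {z : Int} {zs : List Int}
    (h : xs.drop (runLen v xs) = z :: zs) : z ≠ v := by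
  induction xs with
  | nil => simp [runLen] at h
  | cons x xs ih =>
    simp only [runLen] at h
    by_cases hx : x = v
    · rw [if_pos hx] at h; simp at h; exact ih h
    · rw [if_neg hx] at h; simp at h; rw [← h.1]; exact hx

-- skipping the run: every element already in counted is skipped by loopA
lemma loopA_skip (s : List Int) (run rest : List Int) (h c : Int) (cd : List Int)
    (hr : ∀ y ∈ run, y ∈ cd) :
    loopA s (run ++ rest) (h, c, cd) = loopA s rest (h, c, cd) := by
  induction run with
  | nil => simp
  | cons x xs ih =>
    simp only [List.cons_append, loopA, if_pos (hr x (by simp))]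
    exact ih (fun y hy => hr y (by simp [hy]))

-- main invariant: on a sorted suffix t whose values are fresh and whose counts in s agree with t,
-- A's loop computes B's run scan
lemma loopA_eq_scan (s : List Int) : ∀ (N : Nat) (t : List Int), t.length ≤ N →
    ∀ (h c : Int) (cd : List Int),
    t.Pairwise (· ≤ ·) →
    (∀ y ∈ t, y ∉ cd) →
    (∀ y ∈ t, (PySem.List.count s y : Int) = (t.count y : Int)) →
    (loopA s t (h, c, cd)).1 = scanRuns t h c := by
  intro N
  induction N with
  | zero =>
    intro t ht h c cd _ _ _
    rw [List.length_eq_zero_iff.mp (Nat.le_zero.mp ht)]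
    simp [loopA, scanRuns]
  | succ N ih =>
    rintro (_ | ⟨v, ts⟩) ht h c cd hp hcd hcount
    · simp [loopA, scanRuns]
    · -- split off the first run
      have hn : runLen v ts ≤ ts.length := runLen_le v ts
      have hts : ts.take (runLen v ts) ++ ts.drop (runLen v ts) = ts :=
        List.take_append_drop _ ts
      have hvle : ∀ y ∈ ts, v ≤ y := (List.pairwise_cons.mp hp).1
      have hpts : ts.Pairwise (· ≤ ·) := (List.pairwise_cons.mp hp).2
      have hprest : (ts.drop (runLen v ts)).Pairwise (· ≤ ·) := hpts.drop
      -- all elements after the run are strictly greater than v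
      have hrest_gt : ∀ z ∈ ts.drop (runLen v ts), v < z := by
        cases hdr : ts.drop (runLen v ts) with
        | nil => simp
        | cons z zs =>
          have hzne : z ≠ v := drop_runLen_head_ne v ts hdr
          have hzmem : z ∈ ts := by
            have : z ∈ ts.drop (runLen v ts) := by rw [hdr]; exact List.mem_cons_self
            exact List.mem_of_mem_drop this
          have hvz : v < z := lt_of_le_of_ne (hvle z hzmem) (Ne.symm hzne)
          intro w hw
          rcases List.mem_cons.mp hw with rfl | hw'
          · exact hvz
          · have : z ≤ w := by
              have := hprest
              rw [hdr] at this
              exact (List.pairwise_cons.mp this).1 w hw'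
            exact lt_of_lt_of_le hvz this
      have hv_not_rest : v ∉ ts.drop (runLen v ts) := fun hv => absurd (hrest_gt v hv) (lt_irrefl v)
      -- the run consists of copies of v
      have htake : ∀ y ∈ ts.take (runLen v ts), y = v := mem_take_runLen v ts
      -- count of v in v :: ts is runLen + 1
      have hcount_take : (ts.take (runLen v ts)).count v = runLen v ts := by
        rw [List.count_eq_length.mpr (fun b hb => (htake b hb).symm), List.length_take]
        omega
      have hcount_ts : ts.count v = runLen v ts := by
        conv_lhs => rw [← hts]
        rw [List.count_append, hcount_take, List.count_eq_zero.mpr hv_not_rest]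
        omega
      have hcount_v : (v :: ts).count v = runLen v ts + 1 := by
        rw [List.count_cons_self, hcount_ts]
      -- counts of later values live entirely in the rest
      have hcount_rest : ∀ y ∈ ts.drop (runLen v ts),
          (v :: ts).count y = (ts.drop (runLen v ts)).count y := by
        intro y hy
        have hyne : y ≠ v := fun hyv => absurd (hrest_gt y hy) (by rw [hyv]; exact lt_irrefl v)
        have htake0 : (ts.take (runLen v ts)).count y = 0 :=
          List.count_eq_zero.mpr (fun hyt => hyne (htake y hyt))
        rw [List.count_cons_of_ne (Ne.symm hyne)]
        conv_lhs => rw [← hts]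
        rw [List.count_append, htake0, Nat.zero_add]
      -- step A's loop over v
      have hvcd : v ∉ cd := hcd v List.mem_cons_self
      have hsv : (PySem.List.count s v : Int) = ((runLen v ts : Int) + 1) := by
        rw [hcount v List.mem_cons_self, hcount_v]; push_cast; ring
      -- hypotheses for the recursive call on the rest
      have hrest_len : (ts.drop (runLen v ts)).length ≤ N := by
        rw [List.length_drop]
        simp only [List.length_cons] at ht
        omega
      have hrest_cd : ∀ y ∈ ts.drop (runLen v ts), y ∉ cd ++ [v] := by
        intro y hy
        have hyne : y ≠ v := fun hyv => absurd (hrest_gt y hy) (by rw [hyv]; exact lt_irrefl v)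
        have : y ∉ cd := hcd y (List.mem_cons_of_mem v (List.mem_of_mem_drop hy))
        simp [this, hyne]
      have hrest_count : ∀ y ∈ ts.drop (runLen v ts),
          (PySem.List.count s y : Int) = ((ts.drop (runLen v ts)).count y : Int) := by
        intro y hy
        rw [hcount y (List.mem_cons_of_mem v (List.mem_of_mem_drop hy)), hcount_rest y hy]
      -- the copies of v inside the run are skipped
      have hskip : ∀ (h' c' : Int),
          loopA s ts (h', c', cd ++ [v]) = loopA s (ts.drop (runLen v ts)) (h', c', cd ++ [v]) := by
        intro h' c'
        conv_lhs => rw [← hts]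
        exact loopA_skip s _ _ h' c' _ (fun y hy => by simp [htake y hy])
      rw [scanRuns]
      simp only [loopA, if_neg hvcd, hsv]
      by_cases hbr : (runLen v ts : Int) + 1 > c
      · rw [if_pos hbr, if_pos hbr, hskip]
        exact ih _ hrest_len _ _ _ hprest hrest_cd hrest_count
      · rw [if_neg hbr, if_neg hbr, hskip]
        exact ih _ hrest_len _ _ _ hprest hrest_cd hrest_count

-- ===== VERDICT (by name: the statement is the Claim_ definition above) =====
theorem migratoryBirds_spec : Claim_equal_migratoryBirds := by
  intro arr _
  unfold Spec_migratoryBirds migratoryBirds migratoryBirds_alt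
  have hp : (PySem.List.sorted arr (fun x => x) false).Pairwise (· ≤ ·) :=
    PySem.List.sorted_pairwise arr (fun x => x)
  exact loopA_eq_scan _ _ _ (le_refl _) 0 0 [] hp (by simp)
    (fun y _ => by rw [PySem.List.count_eq])
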